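/- GENERATED by mk_final_copies.py from the proof of the farm's unit `vorbis_decode_packet` (farm:vorbis_decode_packet.2: Lemmas.lean) as the
   re-elaboration sweep compiled it — do not edit. -/
import Asan.CheckWalk
import Vorbis.Spec.Units.vorbis_decode_packet

open X86 X86.User Asan Vorbis Vorbis.Spec

namespace Vorbis.Spec.vorbis_decode_packet

/-- The address of the `k`-th shadow byte of the protected frame, as the code computes it (`rbx = (rsp₀ − 152) >> 3`, displacement
`0xC00000 + k`), is `shadowAddr (base / 8 + k)`. -/
theorem sh_addr (sp : Word) (k : Nat) (hk : k < 16) (hroom : 0x700000 + 4048 ≤ sp.toNat) (htop : sp.toNat + 8 ≤ 0x800000) :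
    (sp - 152) >>> 3 + UInt64.ofNat (12582912 + k) = shadowAddr ((sp.toNat - 152) / 8 + k) := by
  apply UInt64.toNat_inj.mp
  rw [shadowAddr_toNat _ (by omega)]
  u_omega

/-- **The shadow layer after the prologue** (0x1136a0 – 0x1136b4 and the `call`'s push): the three inline stores are
`storesMem … Frames.vorbis_decode_packet.prologue` (`ShadowInv.prologue_ra`); `m1` is the memory after the pushes, the spills and the
frame-header words (no shadow byte written: `hun`); the return address of the call is one more stack store. -/
theorem shadow_after_prologue {others : List Obj} {frames : List (Nat × FrameLayout)} {mem m1 : Mem} {sp : Word} (ra : Nat)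
    (hinv0 : ShadowInv others frames (sp.toNat + 8) mem) (hun : ShadowUntouched mem m1)
    (halign : sp.toNat % 8 = 0) (hroom : 0x700000 + 4048 ≤ sp.toNat) (htop : sp.toNat + 8 ≤ 0x800000) :
    ShadowInv others ((sp.toNat - 152, Vorbis.Frames.vorbis_decode_packet) :: frames) (sp.toNat - 168)
      ((((m1.writeLE ((sp - 152) >>> 3 + 12582912) 4 4059165169).writeLE ((sp - 152) >>> 3 + 12582916) 4
        4060410372).writeLE ((sp - 152) >>> 3 + 12582920) 4 4092850948).writeLE (sp - 176) 8 ra) := by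
  have h1 := (hinv0.untouched hun).prologue_ra (top' := sp.toNat - 168) Vorbis.Frames.vorbis_decode_packet_ok halign
    (by simp only [Vorbis.Frames.vorbis_decode_packet]; omega) (by omega) (by omega)
  have hp : Vorbis.Frames.vorbis_decode_packet.prologue =
      [⟨0, 4, 0xf1f1f1f1⟩, ⟨4, 4, 0xf204f204⟩, ⟨8, 4, 0xf3f3f304⟩] := rfl
  have hr : Vorbis.Frames.vorbis_decode_packet.raOff = 152 := rfl
  rw [hp, hr] at h1
  simp only [storesMem, List.foldl_cons, List.foldl_nil] at h1
  have e0 := sh_addr sp 0 (by omega) hroom htop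
  have e4 := sh_addr sp 4 (by omega) hroom htop
  have e8 := sh_addr sp 8 (by omega) hroom htop
  rw [← e0, ← e4, ← e8] at h1
  refine ShadowInv.writeLE ?_ _ _ _ ?_ ?_
  · exact h1
  · u_omega
  · u_omega

/-- **The shadow layer after the two epilogue stores** (0x1136d9, 0x1136e4): they are `storesMem … epilogue` (`ShadowInv.epilogue_ra`). -/
theorem shadow_after_epilogue {others : List Obj} {frames : List (Nat × FrameLayout)} {mem : Mem} {sp : Word} {top' : Nat}
    (h : ShadowInv others ((sp.toNat - 152, Vorbis.Frames.vorbis_decode_packet) :: frames) top' mem)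
    (halign : sp.toNat % 8 = 0) (hroom : 0x700000 + 4048 ≤ sp.toNat) (htop : sp.toNat + 8 ≤ 0x800000)
    (hfr : ∀ bF, bF ∈ frames → sp.toNat + 8 ≤ bF.1) :
    ShadowInv others frames (sp.toNat + 8)
      ((mem.writeLE ((sp - 152) >>> 3 + 12582912) 8 0).writeLE ((sp - 152) >>> 3 + 12582920) 4 0) := by
  have h1 := ShadowInv.epilogue_ra (top := sp.toNat) (F := Vorbis.Frames.vorbis_decode_packet) h halign htop hfr
  have hp : Vorbis.Frames.vorbis_decode_packet.epilogue = [⟨0, 8, 0⟩, ⟨8, 4, 0⟩] := rfl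
  have hr : Vorbis.Frames.vorbis_decode_packet.raOff = 152 := rfl
  rw [hp, hr] at h1
  simp only [storesMem, List.foldl_cons, List.foldl_nil] at h1
  have e0 := sh_addr sp 0 (by omega) hroom htop
  have e8 := sh_addr sp 8 (by omega) hroom htop
  rw [← e0, ← e8] at h1
  exact h1


/-- `DecodeInv.carry` for a footprint made of one window inside the stack region and the shadow: no allocated block is met. -/
theorem decode_carry {others : List Obj} {frames frames' : List (Nat × FrameLayout)} {len : Nat} {A : Arena}
    {stored room : Int} {ysz : Nat → Nat} {mem mem' : Mem} {f top0 top lo hi : Nat}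
    (h : DecodeInv others frames len A stored room ysz mem f) (hinv0 : ShadowInv others frames top0 mem)
    (hs : Mem.SameExcept [⟨lo, hi⟩, ⟨0xC00000, 0xE00000⟩] mem mem') (hlo : 0x700000 ≤ lo) (hhi : hi ≤ 0x800000)
    (hinv : ShadowInv others frames' top mem') : DecodeInv others frames' len A stored room ysz mem' f := by
  refine h.carry hinv0 (AllKept.of_sameExcept h.ok hs ?_) hinv
  intro B hB w hw
  have h1 := h.offStack B hB
  have h2 := h.ok.inside B hB
  simp only [List.mem_cons, List.not_mem_nil, or_false] at hw
  rcases hw with rfl | rfl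
  · simp only []
    omega
  · simp only []
    omega

/-- The three objects of the own protected frame (`mode` +32, `left_end` +48, `right_end` +64) are live once the frame is pushed. -/
theorem own_live (others : List Obj) (frames : List (Nat × FrameLayout)) (base k : Nat) (hk : k = 32 ∨ k = 48 ∨ k = 64) :
    LiveIn others ((base, Vorbis.Frames.vorbis_decode_packet) :: frames) (base + k) 4 := by
  refine ⟨⟨base + k, 4, .stack⟩, ?_, Nat.le_refl _, Nat.le_refl _⟩
  rw [stackObjs_cons]
  apply List.mem_append_left
  apply List.mem_append_left
  unfold FrameLayout.objsAt
  simp only [Vorbis.Frames.vorbis_decode_packet, List.map_cons, List.map_nil, List.mem_cons, List.not_mem_nil, or_false]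
  rcases hk with rfl | rfl | rfl
  · exact Or.inl rfl
  · exact Or.inr (Or.inl rfl)
  · exact Or.inr (Or.inr rfl)

/-- A live object stays live when a protected frame is pushed (`hsub` of `LiveIn.mono`). -/
theorem frames_sub (others : List Obj) (frames : List (Nat × FrameLayout)) (bF : Nat × FrameLayout) (o : Obj)
    (ho : o ∈ stackObjs frames ++ others) : o ∈ stackObjs (bF :: frames) ++ others := by
  obtain ⟨base, F⟩ := bF
  rw [stackObjs_cons]
  rcases List.mem_append.mp ho with hs | hoth
  · exact List.mem_append_left _ (List.mem_append_right _ hs)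
  · exact List.mem_append_right _ hoth

/-- `Top.Apart4` of five addresses from the ten pairwise facts. -/
theorem apart5 {a b c d e : Nat} (h1 : a + 4 ≤ b ∨ b + 4 ≤ a) (h2 : a + 4 ≤ c ∨ c + 4 ≤ a) (h3 : a + 4 ≤ d ∨ d + 4 ≤ a)
    (h4 : a + 4 ≤ e ∨ e + 4 ≤ a) (h5 : b + 4 ≤ c ∨ c + 4 ≤ b) (h6 : b + 4 ≤ d ∨ d + 4 ≤ b) (h7 : b + 4 ≤ e ∨ e + 4 ≤ b)
    (h8 : c + 4 ≤ d ∨ d + 4 ≤ c) (h9 : c + 4 ≤ e ∨ e + 4 ≤ c) (h10 : d + 4 ≤ e ∨ e + 4 ≤ d) :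
    Top.Apart4 [a, b, c, d, e] := by
  unfold Top.Apart4 Top.RangesApart
  simp only [List.pairwise_cons, List.mem_cons, List.not_mem_nil, or_false, forall_eq_or_imp, forall_eq, false_imp_iff,
    implies_true, List.Pairwise.nil, and_true]
  exact ⟨⟨h1, h2, h3, h4⟩, ⟨h5, h6, h7⟩, ⟨h8, h9⟩, h10⟩

/-- `Top.Apart4` of three addresses as its three pairwise facts. -/
theorem apart3 {a b c : Nat} (h : Top.Apart4 [a, b, c]) :
    (a + 4 ≤ b ∨ b + 4 ≤ a) ∧ (a + 4 ≤ c ∨ c + 4 ≤ a) ∧ (b + 4 ≤ c ∨ c + 4 ≤ b) := by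
  unfold Top.Apart4 Top.RangesApart at h
  simp only [List.pairwise_cons, List.mem_cons, List.not_mem_nil, or_false, forall_eq_or_imp, forall_eq, false_imp_iff,
    implies_true, List.Pairwise.nil, and_true] at h
  exact ⟨h.1.1, h.1.2, h.2⟩


open Vorbis.Spec.vorbis_decode_packet_rest in
/-- **vorbis_decode_packet_rest's footprint is inside five coarse windows** (its stack area, the arena, the shadow region, `*len`,
`*p_left`): the `hsub` of `Mem.SameExcept.mono` after the call 0x113740 (holes of `*f`, the `finalY` and channel-buffer blocks and the
free gap are inside the arena: `DecodeInv.obj`, `.buf`, `ArenaOK.block_range`). For the proposed segment .3. -/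
theorem rest_windows_coarse {others : List Obj} {frames : List (Nat × FrameLayout)} {len : Nat} {Ar : Arena}
    {stored room : Int} {mode : Nat} {ysz : Nat → Nat} {s : State}
    (hinv : DecodeInv others frames len Ar stored room ysz s.mem (fOf s)) (hsp : (s.reg .rsp).toNat ≤ 0x800000) :
    ∀ w ∈ (vorbis_decode_packet_rest.spec others frames len Ar stored room mode ysz).footprint s,
      ∀ a : Nat, w.lo ≤ a → a < w.hi →
        ∃ w' ∈ ([⟨(s.reg .rsp).toNat - 3856, (s.reg .rsp).toNat⟩, ⟨Ar.B, Ar.B + Ar.L⟩, ⟨0xC00000, 0xE00000⟩,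
          ⟨lenOf s, lenOf s + 4⟩, ⟨pLeftOf s, pLeftOf s + 4⟩] : List Span), w'.lo ≤ a ∧ a < w'.hi := by
  intro w hw a h1 h2
  have hA := hinv.arena
  have hA1 := hA.AR1
  have hA2 := hA.AR2
  have hobj := hA.block_range (p := fOf s) (n := Off.sizeof.stb_vorbis) hinv.obj
  have hl8 := le_r8 Off.sizeof.stb_vorbis
  simp only [voff] at hobj hl8
  have inArena : ∀ lo hi : Nat, Ar.B ≤ lo → hi ≤ Ar.B + Ar.L → lo ≤ a → a < hi →
      ∃ w' ∈ ([⟨(s.reg .rsp).toNat - 3856, (s.reg .rsp).toNat⟩, ⟨Ar.B, Ar.B + Ar.L⟩, ⟨0xC00000, 0xE00000⟩,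
        ⟨lenOf s, lenOf s + 4⟩, ⟨pLeftOf s, pLeftOf s + 4⟩] : List Span), w'.lo ≤ a ∧ a < w'.hi := by
    intro lo hi k1 k2 k3 k4
    refine ⟨⟨Ar.B, Ar.B + Ar.L⟩, List.mem_cons_of_mem _ List.mem_cons_self, ?_, ?_⟩
    · simp only []
      omega
    · simp only []
      omega
  have inShadow : ∀ lo hi : Nat, hi ≤ 0x1000000 - 8 → (shadowSpan lo hi).lo ≤ a → a < (shadowSpan lo hi).hi →
      ∃ w' ∈ ([⟨(s.reg .rsp).toNat - 3856, (s.reg .rsp).toNat⟩, ⟨Ar.B, Ar.B + Ar.L⟩, ⟨0xC00000, 0xE00000⟩,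
        ⟨lenOf s, lenOf s + 4⟩, ⟨pLeftOf s, pLeftOf s + 4⟩] : List Span), w'.lo ≤ a ∧ a < w'.hi := by
    intro lo hi k1 k3 k4
    unfold shadowSpan at k3 k4
    simp only [] at k3 k4
    refine ⟨⟨0xC00000, 0xE00000⟩, List.mem_cons_of_mem _ (List.mem_cons_of_mem _ List.mem_cons_self), ?_, ?_⟩
    · simp only []
      omega
    · simp only []
      omega
  have hbuf : ∀ C : Block, SampleBuf (RunBlk Ar len) s.mem (fOf s) C → C.base ≤ a → a < C.base + C.size →
      ∃ w' ∈ ([⟨(s.reg .rsp).toNat - 3856, (s.reg .rsp).toNat⟩, ⟨Ar.B, Ar.B + Ar.L⟩, ⟨0xC00000, 0xE00000⟩,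
        ⟨lenOf s, lenOf s + 4⟩, ⟨pLeftOf s, pLeftOf s + 4⟩] : List Span), w'.lo ≤ a ∧ a < w'.hi := by
    intro C hC k3 k4
    rcases hinv.buf C hC with h0 | hb
    · omega
    · have hr := hA.block_range (p := C.base) (n := C.size) hb
      have hl := le_r8 C.size
      exact inArena C.base (C.base + C.size) (by omega) (by omega) k3 k4
  unfold Spec.footprint at hw
  have hmem : w ∈ (⟨(s.reg .rsp).toNat - 3856, (s.reg .rsp).toNat⟩ : Span) :: writes Ar ysz s := hw
  rcases List.mem_cons.mp hmem with rfl | hw'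
  · exact ⟨_, List.mem_cons_self, h1, h2⟩
  · unfold writes at hw'
    rcases List.mem_append.mp hw' with hw' | hw'
    · rcases List.mem_append.mp hw' with hw' | hw'
      · rcases List.mem_append.mp hw' with hw' | hw'
        · simp only [holes, List.mem_cons, List.mem_nil_iff, or_false] at hw'
          rcases hw' with rfl | rfl | rfl | rfl | rfl | rfl | rfl <;> simp only [] at h1 h2 <;>
            exact inArena a (a + 1) (by omega) (by omega) (Nat.le_refl _) (by omega)
        · obtain ⟨c, hc, rfl⟩ := List.mem_map.mp hw'
          have hc' : (c : Int) < stb_vorbis.channels s.mem (fOf s) := by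
            have := List.mem_range.mp hc
            unfold nchan at this
            omega
          have hb := (hinv.fy c hc').1
          exact hbuf _ (SampleBuf.finalY c hc' (ysz c) hb) h1 h2
      · obtain ⟨c, hc, rfl⟩ := List.mem_map.mp hw'
        have hc' : (c : Int) < stb_vorbis.channels s.mem (fOf s) := by
          have := List.mem_range.mp hc
          unfold nchan at this
          omega
        exact hbuf _ (SampleBuf.chan c hc') h1 h2
    · simp only [List.mem_cons, List.mem_nil_iff, or_false] at hw'
      rcases hw' with rfl | rfl | rfl | rfl | rfl
      · simp only [] at h1 h2
        exact inArena a (a + 1) (by omega) (by omega) (Nat.le_refl _) (by omega)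
      · exact ⟨_, List.mem_cons_of_mem _ (List.mem_cons_of_mem _ (List.mem_cons_of_mem _ List.mem_cons_self)), h1, h2⟩
      · exact ⟨_, List.mem_cons_of_mem _ (List.mem_cons_of_mem _ (List.mem_cons_of_mem _
          (List.mem_cons_of_mem _ List.mem_cons_self))), h1, h2⟩
      · exact inShadow _ _ (by omega) h1 h2
      · exact inShadow _ _ (by omega) h1 h2

/-- The frame list inside the function: its own protected frame in front of the callers'. -/
abbrev ownFrames (frames : List (Nat × FrameLayout)) (u : State) : List (Nat × FrameLayout) :=
  ((u.reg .rsp).toNat - 152, Vorbis.Frames.vorbis_decode_packet) :: frames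

/-- **The precondition of vorbis_decode_initial at the call 0x1136d0**, from this function's own precondition, the registers at
the call, the shadow layer after the prologue (`hinv1`) and the footprint so far (`hsame1`: `DecodeInv.carry`). -/
theorem init_pre {others : List Obj} {frames : List (Nat × FrameLayout)} {len : Nat} {A : Arena} {stored room : Int}
    {ysz : Nat → Nat} {u s : State}
    (hsh : ShadowPre others frames u)
    (hinv : DecodeInv others frames len A stored room ysz u.mem (u.reg .rdi).toNat)
    (hleft : StackObj others frames (u.reg .rdx).toNat 4)
    (hright : StackObj others frames (u.reg .rcx).toNat 4)
    (hapart : Top.Apart4 [(u.reg .rsi).toNat, (u.reg .rdx).toNat, (u.reg .rcx).toNat])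
    (he_room : 0x700000 + 4048 ≤ (u.reg .rsp).toNat) (he_top : (u.reg .rsp).toNat + 8 ≤ 0x800000)
    (w_rsp : s.reg .rsp = u.reg .rsp - 176) (w_rsi : s.reg .rsi = u.reg .rdx) (w_rdx : s.reg .rdx = u.reg .rsp - 104)
    (w_r8 : s.reg .r8 = u.reg .rsp - 88) (w_r9 : s.reg .r9 = u.reg .rsp - 120) (c_rdi : s.reg .rdi = u.reg .rdi)
    (c_rcx : s.reg .rcx = u.reg .rcx)
    (hinv1 : ShadowInv others (ownFrames frames u) ((u.reg .rsp).toNat - 168) s.mem)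
    (hsame1 : Mem.SameExcept [⟨(u.reg .rsp).toNat - 176, (u.reg .rsp).toNat⟩, ⟨0xC00000, 0xE00000⟩] u.mem s.mem) :
    (vorbis_decode_initial.spec others (ownFrames frames u) len A stored room ysz).pre s := by
  have hdec1 := decode_carry hinv hsh.inv hsame1 (by omega) (by omega) hinv1
  have hab_left : (u.reg .rsp).toNat + 8 ≤ (u.reg .rdx).toNat := by
    have h1 := hleft.1.above hsh.inv
    have h2 := hleft.2
    omega
  have hab_right : (u.reg .rsp).toNat + 8 ≤ (u.reg .rcx).toNat := by
    have h1 := hright.1.above hsh.inv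
    have h2 := hright.2
    omega
  have e_sp : (u.reg .rsp - 176).toNat + 8 = (u.reg .rsp).toNat - 168 := by u_omega
  have e_le : (u.reg .rsp - 104).toNat = (u.reg .rsp).toNat - 152 + 48 := by u_omega
  have e_re : (u.reg .rsp - 88).toNat = (u.reg .rsp).toNat - 152 + 64 := by u_omega
  have e_mo : (u.reg .rsp - 120).toNat = (u.reg .rsp).toNat - 152 + 32 := by u_omega
  obtain ⟨hap1, hap2, hap3⟩ := apart3 hapart
  refine ⟨⟨?_, hsh.offText⟩, ?_, ?_, ?_, ?_, ?_, ?_, ?_⟩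
  · rw [w_rsp, e_sp]
    exact hinv1
  · rw [c_rdi]
    exact hdec1
  · rw [w_rsi]
    exact ⟨hleft.1.mono (frames_sub _ _ _), hleft.2⟩
  · rw [w_rdx, e_le]
    exact ⟨own_live _ _ _ 48 (by omega), by omega, by omega⟩
  · rw [c_rcx]
    exact ⟨hright.1.mono (frames_sub _ _ _), hright.2⟩
  · rw [w_r8, e_re]
    exact ⟨own_live _ _ _ 64 (by omega), by omega, by omega⟩
  · rw [w_r9, e_mo]
    exact ⟨own_live _ _ _ 32 (by omega), by omega, by omega⟩
  · rw [w_rsi, w_rdx, c_rcx, w_r8, w_r9, e_le, e_re, e_mo]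
    exact apart5 (by omega) (by omega) (by omega) (by omega) (by omega) (by omega) (by omega) (by omega) (by omega)
      (by omega)

/-- **The footprint of vorbis_decode_initial at its call site, seen from this function's stack**: everything it writes is its own
stack area, one of the three objects of this function's protected frame, or lies outside the stack below the caller's stack
pointer (the arena, `*p_left`, `*p_right`) — the windows through which the saved registers are read back (no disjunction left
for `u_omega`) — and inside this function's own footprint. -/
theorem init_same {A : Arena} {sp rsi rdx rcx : Nat} {m m' : Mem}
    (hA1 : A.B + A.L ≤ 0xC00000) (hA1x : A.B + A.L ≤ 0x700000 ∨ 0x800000 ≤ A.B)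
    (hroom : 0x700000 + 4048 ≤ sp) (htop : sp + 8 ≤ 0x800000)
    (hdx : sp + 8 ≤ rdx) (hdx' : rdx + 4 ≤ 0x800000) (hcx : sp + 8 ≤ rcx) (hcx' : rcx + 4 ≤ 0x800000)
    (hw : Mem.SameExcept [⟨sp - 176 - 448, sp - 176⟩, ⟨A.B, A.B + A.L⟩, ⟨rdx, rdx + 4⟩, ⟨sp - 104, sp - 104 + 4⟩,
      ⟨rcx, rcx + 4⟩, ⟨sp - 88, sp - 88 + 4⟩, ⟨sp - 120, sp - 120 + 4⟩] m m') :
    Mem.SameExcept [⟨sp - 624, sp - 176⟩, ⟨sp - 120, sp - 116⟩, ⟨sp - 104, sp - 100⟩, ⟨sp - 88, sp - 84⟩,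
      ⟨0, 0x700000⟩, ⟨sp + 8, 2 ^ 64⟩] m m' ∧
    Mem.SameExcept [⟨sp - 4048, sp⟩, ⟨A.B, A.B + A.L⟩, ⟨0xC00000, 0xE00000⟩, ⟨rsi, rsi + 4⟩, ⟨rdx, rdx + 4⟩,
      ⟨rcx, rcx + 4⟩] m m' := by
  constructor
  · refine hw.mono ?_
    intro w hmem a h1 h2
    simp only [List.mem_cons, List.not_mem_nil, or_false] at hmem
    simp only [List.mem_cons, List.not_mem_nil, or_false, exists_eq_or_imp, exists_eq_left]
    rcases hmem with rfl | rfl | rfl | rfl | rfl | rfl | rfl <;> simp only [] at h1 h2 ⊢ <;> omega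
  · refine hw.mono ?_
    intro w hmem a h1 h2
    simp only [List.mem_cons, List.not_mem_nil, or_false] at hmem
    simp only [List.mem_cons, List.not_mem_nil, or_false, exists_eq_or_imp, exists_eq_left]
    rcases hmem with rfl | rfl | rfl | rfl | rfl | rfl | rfl <;> simp only [] at h1 h2 ⊢ <;> omega

/-- The stores of the prologue (the own stack area, the shadow) lie inside the function's footprint. -/
theorem widen_same {A : Arena} {sp rsi rdx rcx : Nat} {m m' : Mem} (hroom : 0x700000 + 4048 ≤ sp)
    (h : Mem.SameExcept [⟨sp - 176, sp⟩, ⟨0xC00000, 0xE00000⟩] m m') :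
    Mem.SameExcept [⟨sp - 4048, sp⟩, ⟨A.B, A.B + A.L⟩, ⟨0xC00000, 0xE00000⟩, ⟨rsi, rsi + 4⟩, ⟨rdx, rdx + 4⟩,
      ⟨rcx, rcx + 4⟩] m m' := by
  refine h.mono ?_
  intro w hmem a h1 h2
  simp only [List.mem_cons, List.not_mem_nil, or_false] at hmem
  simp only [List.mem_cons, List.not_mem_nil, or_false, exists_eq_or_imp, exists_eq_left]
  rcases hmem with rfl | rfl <;> simp only [] at h1 h2 ⊢ <;> omega

/-- **The assertion at `cut1` = 0x1136d5** (after the call of vorbis_decode_initial, before `test eax, eax`): the exit assertion of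
the proposed segment .1 and the entry assertion of .2. `u` = the state at the function's entry, `v` = now. The own protected frame
is poisoned and in front of the frame list (`ownFrames`); the decode-time invariant holds for that list; rax is the callee's result
with `Top.DecodedMode` about the three frame objects `mode` (rsp₀ − 120), `left_end` (rsp₀ − 104), `right_end` (rsp₀ − 88). -/
structure AtCut1 (u₀ : State) (others : List Obj) (frames : List (Nat × FrameLayout)) (len : Nat) (A : Arena)
    (stored room : Int) (ysz : Nat → Nat) (u : State) (ret : Word) (v : State) : Prop where
  /-- the function was called at `u` -/
  entry : AtEntry (conv u₀) Vorbis.L.vorbis_decode_packet.entry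
    (vorbis_decode_packet.spec others frames len A stored room ysz).frame ret u
  /-- its precondition held there -/
  pre : (vorbis_decode_packet.spec others frames len A stored room ysz).pre u
  rip : v.rip = Vorbis.L.vorbis_decode_packet.cut1
  /-- the steady stack pointer: entry − 0xa8 -/
  rsp : v.reg .rsp = u.reg .rsp - 168
  /-- rbx = SB', the shadow index of the frame -/
  rbx : v.reg .rbx = (u.reg .rsp - 152) >>> 3
  /-- r13 = p_right -/
  r13 : v.reg .r13 = u.reg .rcx
  /-- rbp = p_left -/
  rbp : v.reg .rbp = u.reg .rdx
  /-- r12 = f -/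
  r12 : v.reg .r12 = u.reg .rdi
  r14 : v.reg .r14 = u.reg .r14
  r15 : v.reg .r15 = u.reg .r15
  /-- the return address and the six saved registers in their slots; `len` spilled at `[rsp + 8]` -/
  slot_ret : UInt64.ofNat (v.mem.readLE (u.reg .rsp) 8) = ret
  slot_r15 : UInt64.ofNat (v.mem.readLE (u.reg .rsp - 8) 8) = u.reg .r15
  slot_r14 : UInt64.ofNat (v.mem.readLE (u.reg .rsp - 16) 8) = u.reg .r14
  slot_r13 : UInt64.ofNat (v.mem.readLE (u.reg .rsp - 24) 8) = u.reg .r13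
  slot_r12 : UInt64.ofNat (v.mem.readLE (u.reg .rsp - 32) 8) = u.reg .r12
  slot_rbp : UInt64.ofNat (v.mem.readLE (u.reg .rsp - 40) 8) = u.reg .rbp
  slot_rbx : UInt64.ofNat (v.mem.readLE (u.reg .rsp - 48) 8) = u.reg .rbx
  slot_len : UInt64.ofNat (v.mem.readLE (u.reg .rsp - 160) 8) = u.reg .rsi
  /-- so far only the function's footprint has been written -/
  same : Mem.SameExcept [⟨(u.reg .rsp).toNat - 4048, (u.reg .rsp).toNat⟩, ⟨A.B, A.B + A.L⟩, ⟨0xC00000, 0xE00000⟩,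
    ⟨(u.reg .rsi).toNat, (u.reg .rsi).toNat + 4⟩, ⟨(u.reg .rdx).toNat, (u.reg .rdx).toNat + 4⟩,
    ⟨(u.reg .rcx).toNat, (u.reg .rcx).toNat + 4⟩] u.mem v.mem
  code : (conv u₀).code.In v.mem
  inv : (conv u₀).inv v
  /-- the shadow layer with the own frame poisoned, the clean stack ending at the steady rsp -/
  shadow : ShadowInv others (ownFrames frames u) ((u.reg .rsp).toNat - 168) v.mem
  /-- the decode-time invariant for the frame list with the own frame in front -/
  dec : DecodeInv others (ownFrames frames u) len A stored room ysz v.mem (u.reg .rdi).toNat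
  /-- vorbis_decode_initial's result -/
  eax : s32 (v.reg .rax) = 0 ∨ s32 (v.reg .rax) = 1
  mode : s32 (v.reg .rax) = 1 →
    Top.DecodedMode v.mem (u.reg .rdi).toNat (u.reg .rdx).toNat (u.reg .rsp - 104).toNat (u.reg .rcx).toNat
      (u.reg .rsp - 88).toNat (u.reg .rsp - 120).toNat

set_option maxRecDepth 4000 in
set_option maxHeartbeats 16000000 in
/-- **Segment .1** (0x113660 … 0x1136d5; C 3477–3479): the prologue (six pushes, `sub rsp, 0x78`, the spills, the three
frame-header words, the three inline shadow stores: `shadow_after_prologue`), the call of vorbis_decode_initial with the own frame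
in front of the frame list (`init_pre`), and what is known after it (`init_same`): from the function's entry to `AtCut1`. -/
theorem seg1 (Lay : Layout) (hLay : Lay.hi = 0x1000000) (μ : Microarch) (hμ : UserX.MicroOK μ) (u₀ : State)
    (hcode : HasCodeNat Lay u₀ Vorbis.L.vorbis_decode_packet.entry Vorbis.Code.code_vorbis_decode_packet.nat
      Vorbis.L.vorbis_decode_packet.size)
    (h_init : ∀ (others : List Obj) (frames : List (Nat × FrameLayout)) (len : Nat) (A : Arena) (stored room : Int)
      (ysz : Nat → Nat), Calls Lay μ Vorbis.WayInv (Vorbis.conv u₀) Vorbis.L.vorbis_decode_initial.entry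
        (Vorbis.Spec.vorbis_decode_initial.spec others frames len A stored room ysz))
    (others : List Obj) (frames : List (Nat × FrameLayout)) (len : Nat) (A : Arena) (stored room : Int)
    (ysz : Nat → Nat) (u : State) (ret : Word)
    (he : AtEntry (conv u₀) Vorbis.L.vorbis_decode_packet.entry
      (vorbis_decode_packet.spec others frames len A stored room ysz).frame ret u)
    (hpre : (vorbis_decode_packet.spec others frames len A stored room ysz).pre u) :
    ReachVia Lay μ Vorbis.WayInv u (AtCut1 u₀ others frames len A stored room ysz u ret) := by
  have hpre0 := hpre
  have he0 := he
  v_entry he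
  obtain ⟨hsh, hinv, hlen, hleft, hright, hapart⟩ := hpre
  have hsp := hsh.rsp
  have h_init' := h_init others (ownFrames frames u) len A stored room ysz
  -- the three shadow addresses of the frame, as numbers (`u_omega` does not see through `>>>` inside a disjunction)
  have e_sh0 : ((u.reg .rsp - 152) >>> 3 + 12582912).toNat = 12582912 + ((u.reg .rsp).toNat - 152) / 8 := by u_omega
  have e_sh4 : ((u.reg .rsp - 152) >>> 3 + 12582916).toNat = 12582916 + ((u.reg .rsp).toNat - 152) / 8 := by u_omega
  have e_sh8 : ((u.reg .rsp - 152) >>> 3 + 12582920).toNat = 12582920 + ((u.reg .rsp).toNat - 152) / 8 := by u_omega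
  u_walk hcode [hμ.vendor] until [Vorbis.L.vorbis_decode_packet.cut1] span [Vorbis.L.textLo, Vorbis.L.textHi] side (v_side)
  · v_inv
  · -- the precondition of vorbis_decode_initial
    have hinv1 : ShadowInv others (ownFrames frames u) ((u.reg .rsp).toNat - 168) s_1136d0.mem := by
      rw [w_mem]
      refine shadow_after_prologue _ hsh.inv ?_ he_align he_room he_top
      unfold Asan.ShadowUntouched
      u_eqon
    have hsame1 : Mem.SameExcept [⟨(u.reg .rsp).toNat - 176, (u.reg .rsp).toNat⟩, ⟨0xC00000, 0xE00000⟩] u.mem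
        s_1136d0.mem := by
      u_same
    exact init_pre hsh hinv hleft hright hapart he_room he_top w_rsp w_rsi w_rdx w_r8 w_r9 (w_kept.get .rdi rfl)
      (w_kept.get .rcx rfl) hinv1 hsame1
  · obtain ⟨hun1, hdec_r1, hdsame1, _, _, heax, hmode⟩ := w_post
    -- this function's own footprint up to the call, and the shadow layer with its frame poisoned
    have hsame_s0 : Mem.SameExcept [⟨(u.reg .rsp).toNat - 176, (u.reg .rsp).toNat⟩, ⟨0xC00000, 0xE00000⟩] u.mem
        s_1136d0.mem := by
      u_same
    have hsame_s := widen_same (A := A) (rsi := (u.reg .rsi).toNat) (rdx := (u.reg .rdx).toNat)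
      (rcx := (u.reg .rcx).toNat) he_room hsame_s0
    clear hsame_s0
    have hinv_r1 : ShadowInv others (ownFrames frames u) ((u.reg .rsp).toNat - 168) s_1136d0r.mem := by
      refine ShadowInv.untouched ?_ hun1
      rw [w_mem_1136d0]
      refine shadow_after_prologue _ hsh.inv ?_ he_align he_room he_top
      unfold Asan.ShadowUntouched
      u_eqon
    have c_rdi : s_1136d0.reg .rdi = u.reg .rdi := w_kept_1136d0.get .rdi rfl
    have c_rcx : s_1136d0.reg .rcx = u.reg .rcx := w_kept_1136d0.get .rcx rfl
    have w_eq := Vorbis.conv_code_eqOn w_code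
    have w_df := (show X86.User.abiInv _ from w_inv).1
    have w_mx := (show X86.User.abiInv _ from w_inv).2
    have w_sse := Vorbis.sseOK_of_abiInv w_inv
    rw [c_rdi] at hdec_r1 hdsame1
    rw [c_rdi, w_rsi_1136d0, w_rdx_1136d0, c_rcx, w_r8_1136d0, w_r9_1136d0] at hmode
    -- the callee's footprint, as numbers over the entry state; then seen from this function's stack (`init_same`)
    have e176 : (u.reg .rsp - 176).toNat = (u.reg .rsp).toNat - 176 := by u_omega
    have e104 : (u.reg .rsp - 104).toNat = (u.reg .rsp).toNat - 104 := by u_omega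
    have e88 : (u.reg .rsp - 88).toNat = (u.reg .rsp).toNat - 88 := by u_omega
    have e120 : (u.reg .rsp - 120).toNat = (u.reg .rsp).toNat - 120 := by u_omega
    simp only [X86.User.Spec.footprint, vspec, w_rsp_1136d0, w_rsi_1136d0, w_rdx_1136d0, c_rcx, w_r8_1136d0,
      w_r9_1136d0, e176, e104, e88, e120] at w_same
    have hab_left : (u.reg .rsp).toNat + 8 ≤ (u.reg .rdx).toNat := by
      have h1 := hleft.1.above hsh.inv
      have h2 := hleft.2
      omega
    have hab_right : (u.reg .rsp).toNat + 8 ≤ (u.reg .rcx).toNat := by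
      have h1 := hright.1.above hsh.inv
      have h2 := hright.2
      omega
    have hab_len : (u.reg .rsp).toNat + 8 ≤ (u.reg .rsi).toNat := by
      have h1 := hlen.1.above hsh.inv
      have h2 := hlen.2
      omega
    have hhi_len := hlen.2.2
    have hhi_left := hleft.2.2
    have hhi_right := hright.2.2
    have hboth1 := init_same (rsi := (u.reg .rsi).toNat) hinv.arena.AR1.2.2.2 hinv.arena.AR1x.2 he_room he_top
      hab_left hhi_left hab_right hhi_right w_same
    have hown1 := hboth1.2
    have hstk1 := hboth1.1
    clear w_same hboth1
    -- the stack slots the rest of the function loads, read through the callee's footprint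
    have hp1 : UInt64.ofNat (s_1136d0.mem.readLE (u.reg .rsp - 8) 8) = u.reg .r15 := by u_resolve
    have hp2 : UInt64.ofNat (s_1136d0.mem.readLE (u.reg .rsp - 16) 8) = u.reg .r14 := by u_resolve
    have hp3 : UInt64.ofNat (s_1136d0.mem.readLE (u.reg .rsp - 24) 8) = u.reg .r13 := by u_resolve
    have hp4 : UInt64.ofNat (s_1136d0.mem.readLE (u.reg .rsp - 32) 8) = u.reg .r12 := by u_resolve
    have hp5 : UInt64.ofNat (s_1136d0.mem.readLE (u.reg .rsp - 40) 8) = u.reg .rbp := by u_resolve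
    have hp6 : UInt64.ofNat (s_1136d0.mem.readLE (u.reg .rsp - 48) 8) = u.reg .rbx := by u_resolve
    have hp7 : UInt64.ofNat (s_1136d0.mem.readLE (u.reg .rsp - 160) 8) = u.reg .rsi := by u_resolve
    have hp0 : UInt64.ofNat (s_1136d0.mem.readLE (u.reg .rsp) 8) = ret := by u_resolve
    have hs0 : UInt64.ofNat (s_1136d0r.mem.readLE (u.reg .rsp) 8) = ret := by u_frame hp0
    have hs1 : UInt64.ofNat (s_1136d0r.mem.readLE (u.reg .rsp - 8) 8) = u.reg .r15 := by u_frame hp1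
    have hs2 : UInt64.ofNat (s_1136d0r.mem.readLE (u.reg .rsp - 16) 8) = u.reg .r14 := by u_frame hp2
    have hs3 : UInt64.ofNat (s_1136d0r.mem.readLE (u.reg .rsp - 24) 8) = u.reg .r13 := by u_frame hp3
    have hs4 : UInt64.ofNat (s_1136d0r.mem.readLE (u.reg .rsp - 32) 8) = u.reg .r12 := by u_frame hp4
    have hs5 : UInt64.ofNat (s_1136d0r.mem.readLE (u.reg .rsp - 40) 8) = u.reg .rbp := by u_frame hp5
    have hs6 : UInt64.ofNat (s_1136d0r.mem.readLE (u.reg .rsp - 48) 8) = u.reg .rbx := by u_frame hp6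
    have hs7 : UInt64.ofNat (s_1136d0r.mem.readLE (u.reg .rsp - 160) 8) = u.reg .rsi := by u_frame hp7
    clear hstk1 hp0 hp1 hp2 hp3 hp4 hp5 hp6 hp7
    have hsame_r1 := hsame_s.trans hown1
    clear hsame_s hown1 hun1 hdsame1
    exact ReachVia.done ⟨he0, hpre0, w_rip, w_rsp, w_rbx, w_r13, w_rbp, w_r12, w_kept.get .r14 rfl, w_kept.get .r15 rfl,
      hs0, hs1, hs2, hs3, hs4, hs5, hs6, hs7, hsame_r1, w_code, w_inv, hinv_r1, hdec_r1, heax, hmode⟩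


/-- **The two shadow stores of the single epilogue (0x1136d9, 0x1136e4) give the postcondition's first two clauses**: the shadow
layer of the callers again (`shadow_after_epilogue`: the own frame popped and clean, the clean stack ending at the entry rsp + 8),
and the decode-time invariant for the callers' frame list (`decode_carry`: only shadow bytes were written). -/
theorem epilogue_post {others : List Obj} {frames : List (Nat × FrameLayout)} {len : Nat} {A : Arena} {stored room : Int}
    {ysz : Nat → Nat} {u : State} {m : Mem} {top' f : Nat}
    (hsh : ShadowPre others frames u) (halign : (u.reg .rsp).toNat % 8 = 0)
    (hroom : 0x700000 + 4048 ≤ (u.reg .rsp).toNat) (htop : (u.reg .rsp).toNat + 8 ≤ 0x800000)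
    (hinv : ShadowInv others (ownFrames frames u) top' m)
    (hdec : DecodeInv others (ownFrames frames u) len A stored room ysz m f) :
    ShadowInv others frames ((u.reg .rsp).toNat + 8)
        ((m.writeLE ((u.reg .rsp - 152) >>> 3 + 12582912) 8 0).writeLE ((u.reg .rsp - 152) >>> 3 + 12582920) 4 0) ∧
      DecodeInv others frames len A stored room ysz
        ((m.writeLE ((u.reg .rsp - 152) >>> 3 + 12582912) 8 0).writeLE ((u.reg .rsp - 152) >>> 3 + 12582920) 4 0) f := by
  have hfr : ∀ bF, bF ∈ frames → (u.reg .rsp).toNat + 8 ≤ bF.1 := by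
    intro bF hbF
    obtain ⟨_, _, k3, _, _⟩ := hsh.inv.stack.active bF hbF
    exact k3
  have hinv' := shadow_after_epilogue hinv halign hroom htop hfr
  refine ⟨hinv', ?_⟩
  have e_sh0 : ((u.reg .rsp - 152) >>> 3 + 12582912).toNat = 12582912 + ((u.reg .rsp).toNat - 152) / 8 := by u_omega
  have e_sh8 : ((u.reg .rsp - 152) >>> 3 + 12582920).toNat = 12582920 + ((u.reg .rsp).toNat - 152) / 8 := by u_omega
  have hs : Mem.SameExcept [⟨0x700000, 0x800000⟩, ⟨0xC00000, 0xE00000⟩] m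
      ((m.writeLE ((u.reg .rsp - 152) >>> 3 + 12582912) 8 0).writeLE ((u.reg .rsp - 152) >>> 3 + 12582920) 4 0) := by
    u_same
  exact decode_carry hdec hinv hs (by omega) (by omega) hinv'


/-- A stack slot of the own frame reads the same after the epilogue's two shadow stores. -/
theorem read_through_epilogue {u : State} {m : Mem} {x : Word} (a : Word)
    (hroom : 0x700000 + 4048 ≤ (u.reg .rsp).toNat) (htop : (u.reg .rsp).toNat + 8 ≤ 0x800000)
    (ha1 : 0x700000 ≤ a.toNat) (ha2 : a.toNat + 8 ≤ 0x800000)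
    (h : UInt64.ofNat (m.readLE a 8) = x) :
    UInt64.ofNat (((m.writeLE ((u.reg .rsp - 152) >>> 3 + 12582912) 8 0).writeLE
      ((u.reg .rsp - 152) >>> 3 + 12582920) 4 0).readLE a 8) = x := by
  have e_sh0 : ((u.reg .rsp - 152) >>> 3 + 12582912).toNat = 12582912 + ((u.reg .rsp).toNat - 152) / 8 := by u_omega
  have e_sh8 : ((u.reg .rsp - 152) >>> 3 + 12582920).toNat = 12582920 + ((u.reg .rsp).toNat - 152) / 8 := by u_omega
  u_read

set_option maxRecDepth 4000 in
set_option maxHeartbeats 16000000 in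
/-- **Segment .2, the arm `eax = 0`** (0x1136d5 `test eax, eax ; jne` not taken, then the single epilogue 0x1136d9 …
0x1136fc): the two shadow stores zero the frame's shadow (`epilogue_post`), `add rsp, 0x78`, six pops, `ret`. -/
theorem seg2_zero (Lay : Layout) (hLay : Lay.hi = 0x1000000) (μ : Microarch) (hμ : UserX.MicroOK μ) (u₀ : State)
    (hcode : HasCodeNat Lay u₀ Vorbis.L.vorbis_decode_packet.entry Vorbis.Code.code_vorbis_decode_packet.nat
      Vorbis.L.vorbis_decode_packet.size)
    (others : List Obj) (frames : List (Nat × FrameLayout)) (len : Nat) (A : Arena) (stored room : Int)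
    (ysz : Nat → Nat) (u : State) (ret : Word) (v : State)
    (hat : AtCut1 u₀ others frames len A stored room ysz u ret v) (hz : s32 (v.reg .rax) = 0) :
    ReachVia Lay μ Vorbis.WayInv v
      (Returned (conv u₀) (vorbis_decode_packet.spec others frames len A stored room ysz) u ret) := by
  have he := hat.entry
  v_entry he
  obtain ⟨hsh, hinv, hlen, hleft, hright, hapart⟩ := hat.pre
  have w_rip := hat.rip
  have c_rsp := hat.rsp
  have c_rbx := hat.rbx
  have c_r12 := hat.r12
  have c_r13 := hat.r13
  have c_r14 := hat.r14
  have c_r15 := hat.r15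
  have c_rbp := hat.rbp
  have w_eq := Vorbis.conv_code_eqOn hat.code
  have hdf : v.flags .df = false := (show abiInv _ from hat.inv).1
  have hmx : v.mxcsr &&& 0x1F80 = 0x1F80 := (show abiInv _ from hat.inv).2
  have hsse := Vorbis.sseOK_of_abiInv hat.inv
  have s0 := hat.slot_ret
  have s1 := hat.slot_r15
  have s2 := hat.slot_r14
  have s3 := hat.slot_r13
  have s4 := hat.slot_r12
  have s5 := hat.slot_rbp
  have s6 := hat.slot_rbx
  have hsame := hat.same
  have e_sh0 : ((u.reg .rsp - 152) >>> 3 + 12582912).toNat = 12582912 + ((u.reg .rsp).toNat - 152) / 8 := by u_omega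
  have e_sh8 : ((u.reg .rsp - 152) >>> 3 + 12582920).toNat = 12582920 + ((u.reg .rsp).toNat - 152) / 8 := by u_omega
  obtain ⟨z, c_rax⟩ : ∃ z, v.reg .rax = z := ⟨_, rfl⟩
  rw [c_rax] at hz
  u_walk hcode [hμ.vendor] until [Vorbis.L.vorbis_decode_packet.chk1] span [Vorbis.L.textLo, Vorbis.L.textHi] side (v_side)
  · -- the arm `eax ≠ 0` contradicts `hz`
    exfalso
    apply hbr_1136d7
    have h1 := s32_eq_argInt z
    rw [argInt_def] at h1
    rw [part32_toNat]
    have h2 := sint32_cases (z.toNat % 2 ^ 32)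
    have h3 : z.toNat % 2 ^ 32 < 2 ^ 32 := Nat.mod_lt _ (by decide)
    omega
  · -- the arm `eax = 0`: the epilogue, walked to the `ret`
    have k15 : s_1136fc.reg .r15 = u.reg .r15 := by
      rw [w_r15]
      first
        | done
        | exact read_through_epilogue _ he_room he_top (by u_omega) (by u_omega) s1
    have k14 : s_1136fc.reg .r14 = u.reg .r14 := by
      rw [w_r14]
      first
        | done
        | exact read_through_epilogue _ he_room he_top (by u_omega) (by u_omega) s2
    have k13 : s_1136fc.reg .r13 = u.reg .r13 := by
      rw [w_r13]
      first
        | done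
        | exact read_through_epilogue _ he_room he_top (by u_omega) (by u_omega) s3
    have k12 : s_1136fc.reg .r12 = u.reg .r12 := by
      rw [w_r12]
      first
        | done
        | exact read_through_epilogue _ he_room he_top (by u_omega) (by u_omega) s4
    have kbp : s_1136fc.reg .rbp = u.reg .rbp := by
      rw [w_rbp]
      first
        | done
        | exact read_through_epilogue _ he_room he_top (by u_omega) (by u_omega) s5
    have kbx : s_1136fc.reg .rbx = u.reg .rbx := by
      rw [w_rbx]
      first
        | done
        | exact read_through_epilogue _ he_room he_top (by u_omega) (by u_omega) s6
    have hpost := epilogue_post hsh he_align he_room he_top hat.shadow hat.dec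
    refine ReachVia.done ?_
    refine X86.User.Returned.mk w_rip w_rsp ?_ ?_ (Vorbis.conv_code_in w_eq) ?_ ?_
    · -- the callee-saved registers: six popped back
      intro r hr
      cases r <;> first
        | (exact absurd hr (by decide))
        | (with_reducible assumption)
    · -- the footprint: the two shadow stores on top of `AtCut1.same`
      simp only [X86.User.Spec.footprint, vspec]
      rw [w_mem]
      refine Mem.SameExcept.step_writeLE _ _ _ (Mem.SameExcept.step_writeLE _ _ _ hsame ?_ ?_) ?_ ?_
      · omega
      · exact ⟨⟨0xC00000, 0xE00000⟩, List.mem_cons_of_mem _ (List.mem_cons_of_mem _ List.mem_cons_self),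
          by simp only []; omega, by simp only []; omega⟩
      · omega
      · exact ⟨⟨0xC00000, 0xE00000⟩, List.mem_cons_of_mem _ (List.mem_cons_of_mem _ List.mem_cons_self),
          by simp only []; omega, by simp only []; omega⟩
    · v_inv
    · -- the postcondition
      have e : (u.reg .rsp + 8).toNat = (u.reg .rsp).toNat + 8 := by u_omega
      refine ⟨?_, ?_, ?_⟩
      · rw [w_rsp, w_mem, e]
        exact hpost.1
      · rw [w_mem]
        exact hpost.2
      · intro hne
        exfalso
        apply hne
        rw [w_kept.get .rax rfl, c_rax]
        exact hz


/-- **Reading back a PREFIX of what was stored**: the low `k ≤ n` bytes of a little-endian store of `n` bytes (a 4-byte `int` read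
from the 8-byte slot of a `push`: vorbis_decode_packet_rest's seventh argument `right_end`). -/
theorem readLE_writeLE_prefix (f : Mem) (a : Word) (n k v : Nat) (hk : k ≤ n) (hn : n ≤ 2 ^ 64) :
    (f.writeLE a n v).readLE a k = v % 256 ^ k := by
  induction k generalizing f a v n with
  | zero => simp [Mem.readLE, Nat.mod_one]
  | succ k ih =>
    obtain ⟨m, rfl⟩ : ∃ m, n = m + 1 := ⟨n - 1, by omega⟩
    simp only [Mem.writeLE, Mem.readLE]
    have hhead : ∀ i, i < m → a + 1 + UInt64.ofNat i ≠ a := by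
      intro i hi
      rw [Mem.add_ofNat_succ]
      exact PhysMem.add_ofNat_ne_self a (i + 1) (by omega) (by omega)
    rw [ih _ _ m _ (by omega) (by omega), Mem.read_writeLE_other _ _ _ _ _ hhead, Mem.read_write_same]
    rw [Nat.pow_succ, Nat.mul_comm (256 ^ k) 256, Nat.mod_mul]
    simp

/-- The signed value of a dword loaded into a register (`mov r32, [m]`) is the `int` at that address. -/
theorem s32_load (V : Mem) (w : Word) : s32 (Word.ofBV (BitVec.ofNat 32 (V.readLE w 4))) = V.i32 w.toNat := by
  have hlt := Mem.readLE_lt' V w 4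
  rw [s32_eq_argInt, argInt_def, toNat_ofBV32, BitVec.toNat_ofNat, Mem.i32_def]
  have e : V.u32 w.toNat = V.readLE w 4 := by
    have h := Mem.readLE_addr4 V w.toNat
    rw [addr_toNat] at h
    exact h.symm
  rw [e]
  congr 1
  omega

set_option maxRecDepth 4000 in
open Vorbis.Spec.vorbis_decode_packet_rest in
/-- **The precondition of vorbis_decode_packet_rest at the call 0x113740** (`pre_113740` of the arm `eax = 1`), from the assertion at
`cut1` (`V` = the memory there: `hinv_v`, `hdec_v`, `hmode` = `Top.DecodedMode`) and the walker's facts about the state `s` at the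
callee's entry: the shadow layer under three more stack stores, `DecodeInv.carry`, and `Args` — the mode index through `movsxd` /
`lea` (`toNat_sext32`, MD1), W2 read in the new memory (`*f` and the frame objects are off the three new slots), `right_end` as the low
dword of the `push r15` slot (`readLE_writeLE_prefix`), `p_left` as the `push rbp` slot. -/
theorem rest_pre {others : List Obj} {frames : List (Nat × FrameLayout)} {len : Nat} {A : Arena} {stored room : Int}
    {ysz : Nat → Nat} {u s : State} {V : Mem} (ra : Nat)
    (hsh : ShadowPre others frames u)
    (hlen : StackObj others frames (u.reg .rsi).toNat 4) (hleft : StackObj others frames (u.reg .rdx).toNat 4)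
    (hright : StackObj others frames (u.reg .rcx).toNat 4)
    (hapart : Top.Apart4 [(u.reg .rsi).toNat, (u.reg .rdx).toNat, (u.reg .rcx).toNat])
    (he_room : 0x700000 + 4048 ≤ (u.reg .rsp).toNat) (he_top : (u.reg .rsp).toNat + 8 ≤ 0x800000)
    (he_align : (u.reg .rsp).toNat % 8 = 0)
    (hinv_v : ShadowInv others (ownFrames frames u) ((u.reg .rsp).toNat - 168) V)
    (hdec_v : DecodeInv others (ownFrames frames u) len A stored room ysz V (u.reg .rdi).toNat)
    (hmode : Top.DecodedMode V (u.reg .rdi).toNat (u.reg .rdx).toNat (u.reg .rsp - 104).toNat (u.reg .rcx).toNat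
      (u.reg .rsp - 88).toNat (u.reg .rsp - 120).toNat)
    (w_rsp : s.reg .rsp = u.reg .rsp - 192) (w_rdi : s.reg .rdi = u.reg .rdi) (w_rsi : s.reg .rsi = u.reg .rsi)
    (w_rdx : s.reg .rdx = u.reg .rdi +
      (Word.ofBV (BitVec.signExtend 64 (BitVec.ofNat 32 (V.readLE (u.reg .rsp - 120) 4))) +
        Word.ofBV (BitVec.signExtend 64 (BitVec.ofNat 32 (V.readLE (u.reg .rsp - 120) 4))) * 2) * 2 + 484)
    (w_rcx : s.reg .rcx = Word.ofBV (BitVec.ofNat 32 (V.readLE (u.reg .rdx) 4)))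
    (w_r9 : s.reg .r9 = Word.ofBV (BitVec.ofNat 32 (V.readLE (u.reg .rcx) 4)))
    (w_mem : s.mem = ((V.writeLE (u.reg .rsp - 176) 8 (u.reg .rdx).toNat).writeLE (u.reg .rsp - 184) 8
      (BitVec.setWidth 64 (BitVec.ofNat 32 (V.readLE (u.reg .rsp - 88) 4))).toNat).writeLE (u.reg .rsp - 192) 8 ra) :
    (vorbis_decode_packet_rest.spec others (ownFrames frames u) len A stored room
      (V.i32 (u.reg .rsp - 120).toNat).toNat ysz).pre s := by
  have hab_left : (u.reg .rsp).toNat + 8 ≤ (u.reg .rdx).toNat := by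
    have h1 := hleft.1.above hsh.inv
    have h2 := hleft.2
    omega
  have hab_right : (u.reg .rsp).toNat + 8 ≤ (u.reg .rcx).toNat := by
    have h1 := hright.1.above hsh.inv
    have h2 := hright.2
    omega
  have hab_len : (u.reg .rsp).toNat + 8 ≤ (u.reg .rsi).toNat := by
    have h1 := hlen.1.above hsh.inv
    have h2 := hlen.2
    omega
  have hhi_left := hleft.2.2
  have hhi_right := hright.2.2
  -- the memory at the callee's entry: three stores into the own stack area
  have hS : Mem.SameExcept [⟨(u.reg .rsp).toNat - 192, (u.reg .rsp).toNat - 168⟩, ⟨0xC00000, 0xE00000⟩] V s.mem := by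
    rw [w_mem]
    u_same
  -- (a) the shadow layer
  have e_sp : (s.reg .rsp).toNat + 8 = (u.reg .rsp).toNat - 184 := by
    rw [w_rsp]
    u_omega
  have hinv_s : ShadowInv others (ownFrames frames u) ((u.reg .rsp).toNat - 184) s.mem := by
    rw [w_mem]
    have h1 := ShadowInv.writeLE hinv_v (u.reg .rsp - 176) 8 (u.reg .rdx).toNat (by u_omega) (by u_omega)
    have h2 := ShadowInv.writeLE h1 (u.reg .rsp - 184) 8
      (BitVec.setWidth 64 (BitVec.ofNat 32 (V.readLE (u.reg .rsp - 88) 4))).toNat (by u_omega) (by u_omega)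
    have h3 := ShadowInv.writeLE h2 (u.reg .rsp - 192) 8 ra (by u_omega) (by u_omega)
    exact h3.lower (by omega) (by omega) (by omega)
  -- (b) the invariant
  have hdec_s := decode_carry hdec_v hinv_v hS (by omega) (by omega) hinv_s
  refine ⟨⟨?_, hsh.offText⟩, ?_, ?_⟩
  · rw [e_sp]
    exact hinv_s
  · show DecodeInv others (ownFrames frames u) len A stored room ysz s.mem (s.reg .rdi).toNat
    rw [w_rdi]
    exact hdec_s
  · -- (c) the arguments
    obtain ⟨hm0, hm1, hw2⟩ := hmode
    have hmd := hdec_v.config.mode.MD1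
    have hrange := hdec_v.arena.block_range (p := (u.reg .rdi).toNat) (n := Off.sizeof.stb_vorbis) hdec_v.obj
    have hl8 := le_r8 Off.sizeof.stb_vorbis
    simp only [voff] at hrange hl8
    have hA1 := hdec_v.arena.AR1
    have hA2 := hdec_v.arena.AR2
    have hoff := hdec_v.objOff
    simp only [voff] at hoff
    have hEf : Mem.EqOn (u.reg .rdi).toNat ((u.reg .rdi).toNat + 1808) V s.mem := by
      refine hS.eqOn _ _ ?_
      intro w hw
      simp only [List.mem_cons, List.not_mem_nil, or_false] at hw
      rcases hw with rfl | rfl <;> simp only [] <;> omega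
    have hEs : Mem.EqOn ((u.reg .rsp).toNat - 168) 0x800000 V s.mem := by
      refine hS.eqOn _ _ ?_
      intro w hw
      simp only [List.mem_cons, List.not_mem_nil, or_false] at hw
      rcases hw with rfl | rfl <;> simp only [] <;> omega
    have e120 : (u.reg .rsp - 120).toNat = (u.reg .rsp).toNat - 120 := by u_omega
    have e104 : (u.reg .rsp - 104).toNat = (u.reg .rsp).toNat - 104 := by u_omega
    have e88 : (u.reg .rsp - 88).toNat = (u.reg .rsp).toNat - 88 := by u_omega
    have hmodeNat : ((V.i32 (u.reg .rsp - 120).toNat).toNat : Int) = V.i32 (u.reg .rsp - 120).toNat :=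
      Int.toNat_of_nonneg hm0
    have hu32 := Mem.u32_of_i32_nonneg V _ hm0
    have hrd : V.readLE (u.reg .rsp - 120) 4 = (V.i32 (u.reg .rsp - 120).toNat).toNat := by
      rw [← hu32]
      have h := Mem.readLE_addr4 V (u.reg .rsp - 120).toNat
      rw [addr_toNat] at h
      exact h
    have hlt : (V.i32 (u.reg .rsp - 120).toNat).toNat < 64 := by omega
    have hsx : (Word.ofBV (BitVec.signExtend 64 (BitVec.ofNat 32 (V.readLE (u.reg .rsp - 120) 4)))).toNat =
        (V.i32 (u.reg .rsp - 120).toNat).toNat := by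
      rw [hrd, toNat_sext32 _ (by simp only [BitVec.toNat_ofNat, Nat.reducePow]; omega)]
      simp only [BitVec.toNat_ofNat, Nat.reducePow]
      omega
    have hm_eq : (s.reg .rdx).toNat =
        stb_vorbis.mode_config_at (u.reg .rdi).toNat (V.i32 (u.reg .rsp - 120).toNat).toNat := by
      rw [w_rdx]
      simp only [vacc, voff]
      generalize Word.ofBV (BitVec.signExtend 64 (BitVec.ofNat 32 (V.readLE (u.reg .rsp - 120) 4))) = sx at hsx
      u_omega
    have k4 : lsOf s = V.i32 (u.reg .rdx).toNat := by
      show s32 (s.reg .rcx) = _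
      rw [w_rcx]
      exact s32_load V _
    have k5 : rsOf s = V.i32 (u.reg .rcx).toNat := by
      show s32 (s.reg .r9) = _
      rw [w_r9]
      exact s32_load V _
    have kb0 : stb_vorbis.blocksize_0 s.mem (u.reg .rdi).toNat = stb_vorbis.blocksize_0 V (u.reg .rdi).toNat := by
      simp only [vacc, voff]
      exact hEf.i32 _ (by omega) (by omega) (by omega)
    have kb1 : stb_vorbis.blocksize_1 s.mem (u.reg .rdi).toNat = stb_vorbis.blocksize_1 V (u.reg .rdi).toNat := by
      simp only [vacc, voff]
      exact hEf.i32 _ (by omega) (by omega) (by omega)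
    have kmc : stb_vorbis.mode_count s.mem (u.reg .rdi).toNat = stb_vorbis.mode_count V (u.reg .rdi).toNat := by
      simp only [vacc, voff]
      exact hEf.i32 _ (by omega) (by omega) (by omega)
    have kbf : Mode.blockflag s.mem
          (stb_vorbis.mode_config_at (u.reg .rdi).toNat (V.i32 (u.reg .rsp - 120).toNat).toNat) =
        Mode.blockflag V (stb_vorbis.mode_config_at (u.reg .rdi).toNat (V.i32 (u.reg .rsp - 120).toNat).toNat) := by
      simp only [vacc, voff]
      exact hEf.u8 _ (by omega) (by omega) (by omega)
    have hpl : pLeftOf s = (u.reg .rdx).toNat := by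
      unfold pLeftOf
      rw [w_rsp, w_mem]
      have ea : u.reg .rsp - 192 + 16 = u.reg .rsp - 176 := by
        apply UInt64.toNat_inj.mp
        u_omega
      rw [ea]
      u_read
    have k6 : reOf s = V.i32 (u.reg .rsp - 88).toNat := by
      unfold reOf
      rw [w_rsp, w_mem]
      have ea : u.reg .rsp - 192 + 8 = u.reg .rsp - 184 := by
        apply UInt64.toNat_inj.mp
        u_omega
      rw [ea]
      rw [Mem.readLE_writeLE_disjoint_noWrap _ _ _ _ _ _ (by u_omega) (by u_omega) (by u_omega)]
      rw [readLE_writeLE_prefix _ _ 8 4 _ (by omega) (by omega)]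
      rw [Mem.i32_def]
      congr 1
      have h := Mem.readLE_addr4 V (u.reg .rsp - 88).toNat
      rw [addr_toNat] at h
      rw [← h]
      have hlt := Mem.readLE_lt' V (u.reg .rsp - 88) 4
      simp only [BitVec.toNat_setWidth, BitVec.toNat_ofNat, Nat.reducePow]
      omega
    have e_sp24 : (s.reg .rsp).toNat + 24 = (u.reg .rsp).toNat - 168 := by
      rw [w_rsp]
      u_omega
    refine ⟨?_, ?_, ?_, ?_, ?_, ?_, ?_, ?_, ?_⟩
    · -- the mode index is below `mode_count`
      show ((V.i32 (u.reg .rsp - 120).toNat).toNat : Int) < stb_vorbis.mode_count s.mem (s.reg .rdi).toNat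
      rw [w_rdi, kmc, hmodeNat]
      exact hm1
    · -- `m = f->mode_config + mode`
      show (s.reg .rdx).toNat = stb_vorbis.mode_config_at (s.reg .rdi).toNat _
      rw [w_rdi]
      exact hm_eq
    · -- W2, from `Top.DecodedMode`
      refine ⟨V.i32 (u.reg .rsp - 104).toNat, ?_⟩
      show W2 (stb_vorbis.blocksize_0 s.mem (s.reg .rdi).toNat) (stb_vorbis.blocksize_1 s.mem (s.reg .rdi).toNat)
        (nIntOf s.mem (s.reg .rdi).toNat (s.reg .rdx).toNat) (lsOf s) _ (rsOf s) (reOf s)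
      rw [k4, k5, k6]
      unfold nIntOf
      rw [w_rdi, hm_eq, kbf, kb0, kb1]
      exact hw2
    · -- `mem32[p_left] = left_start`
      rw [hpl, k4]
      exact hEs.i32 _ (by omega) (by omega) (by omega)
    · show StackObj others _ (s.reg .rsi).toNat 4
      rw [w_rsi]
      exact ⟨hlen.1.mono (frames_sub _ _ _), hlen.2⟩
    · rw [hpl]
      exact ⟨hleft.1.mono (frames_sub _ _ _), hleft.2⟩
    · show (s.reg .rsi).toNat + 4 ≤ pLeftOf s ∨ pLeftOf s + 4 ≤ (s.reg .rsi).toNat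
      rw [hpl, w_rsi]
      exact (apart3 hapart).1
    · -- `*len` lies above the two stack arguments (`Args.len_above`): it is an object of a caller's frame
      show (s.reg .rsp).toNat + 24 ≤ (s.reg .rsi).toNat
      rw [e_sp24, w_rsi]
      omega
    · -- `*p_left` lies above the two stack arguments (`Args.left_above`)
      show (s.reg .rsp).toNat + 24 ≤ pLeftOf s
      rw [e_sp24, hpl]
      omega


/-- **The (coarse) footprint of vorbis_decode_packet_rest at its call site, seen from this function's stack**: its own stack area,
or outside the stack below the caller's stack pointer (the arena, the shadow, `*len`, `*p_left`) — the windows through which the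
saved registers are read back — and inside this function's own footprint. -/
theorem rest_same {A : Arena} {sp rsi rdx rcx : Nat} {m m' : Mem}
    (hA1 : A.B + A.L ≤ 0xC00000) (hA1x : A.B + A.L ≤ 0x700000 ∨ 0x800000 ≤ A.B)
    (hroom : 0x700000 + 4048 ≤ sp) (htop : sp + 8 ≤ 0x800000)
    (hsi : sp + 8 ≤ rsi) (hsi' : rsi + 4 ≤ 0x800000) (hdx : sp + 8 ≤ rdx) (hdx' : rdx + 4 ≤ 0x800000)
    (hw : Mem.SameExcept [⟨sp - 192 - 3856, sp - 192⟩, ⟨A.B, A.B + A.L⟩, ⟨0xC00000, 0xE00000⟩, ⟨rsi, rsi + 4⟩,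
      ⟨rdx, rdx + 4⟩] m m') :
    Mem.SameExcept [⟨sp - 4048, sp - 192⟩, ⟨0, 0x700000⟩, ⟨sp + 8, 2 ^ 64⟩] m m' ∧
    Mem.SameExcept [⟨sp - 4048, sp⟩, ⟨A.B, A.B + A.L⟩, ⟨0xC00000, 0xE00000⟩, ⟨rsi, rsi + 4⟩, ⟨rdx, rdx + 4⟩,
      ⟨rcx, rcx + 4⟩] m m' := by
  constructor
  · refine hw.mono ?_
    intro w hmem a h1 h2
    simp only [List.mem_cons, List.not_mem_nil, or_false] at hmem
    simp only [List.mem_cons, List.not_mem_nil, or_false, exists_eq_or_imp, exists_eq_left]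
    rcases hmem with rfl | rfl | rfl | rfl | rfl <;> simp only [] at h1 h2 ⊢ <;> omega
  · refine hw.mono ?_
    intro w hmem a h1 h2
    simp only [List.mem_cons, List.not_mem_nil, or_false] at hmem
    simp only [List.mem_cons, List.not_mem_nil, or_false, exists_eq_or_imp, exists_eq_left]
    rcases hmem with rfl | rfl | rfl | rfl | rfl <;> simp only [] at h1 h2 ⊢ <;> omega

/-- `*p_right` is outside vorbis_decode_packet_rest's (coarse) footprint: a caller's stack object, apart from `*len` and `*p_left`. -/
theorem pright_kept {A : Arena} {sp rsi rdx rcx : Nat} {m m' : Mem}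
    (hA1x : A.B + A.L ≤ 0x700000 ∨ 0x800000 ≤ A.B)
    (hroom : 0x700000 + 4048 ≤ sp) (hcx : sp + 8 ≤ rcx) (hcx' : rcx + 4 ≤ 0x800000)
    (hap2 : rsi + 4 ≤ rcx ∨ rcx + 4 ≤ rsi) (hap3 : rdx + 4 ≤ rcx ∨ rcx + 4 ≤ rdx)
    (hw : Mem.SameExcept [⟨sp - 192 - 3856, sp - 192⟩, ⟨A.B, A.B + A.L⟩, ⟨0xC00000, 0xE00000⟩, ⟨rsi, rsi + 4⟩,
      ⟨rdx, rdx + 4⟩] m m') : m'.i32 rcx = m.i32 rcx := by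
  have hE : Mem.EqOn rcx (rcx + 4) m m' := by
    refine hw.eqOn _ _ ?_
    intro w hmem
    simp only [List.mem_cons, List.not_mem_nil, or_false] at hmem
    rcases hmem with rfl | rfl | rfl | rfl | rfl <;> simp only [] <;> omega
  exact hE.i32 _ (Nat.le_refl _) (Nat.le_refl _) (by omega)

/-- The eighth argument of vorbis_decode_packet_rest, the slot of `push rbp` at `[entry rsp + 16]`, is `p_left`. -/
theorem pleft_eq {u s : State} {V : Mem} (x ra : Nat)
    (he_room : 0x700000 + 4048 ≤ (u.reg .rsp).toNat) (he_top : (u.reg .rsp).toNat + 8 ≤ 0x800000)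
    (w_rsp : s.reg .rsp = u.reg .rsp - 192)
    (w_mem : s.mem = ((V.writeLE (u.reg .rsp - 176) 8 (u.reg .rdx).toNat).writeLE (u.reg .rsp - 184) 8 x).writeLE
      (u.reg .rsp - 192) 8 ra) :
    vorbis_decode_packet_rest.pLeftOf s = (u.reg .rdx).toNat := by
  unfold vorbis_decode_packet_rest.pLeftOf
  rw [w_rsp, w_mem]
  have ea : u.reg .rsp - 192 + 16 = u.reg .rsp - 176 := by
    apply UInt64.toNat_inj.mp
    u_omega
  rw [ea]
  u_read


/-- **W3 about the three `int` objects after the epilogue's two shadow stores**: every read of `Top.W3Mem` (`blocksize_1` in `*f`,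
the three dwords on the stack) lies below C00000H, where the stores change nothing; `rs` = `right_start` is `*p_right`. -/
theorem w3_final {u : State} {R : Mem} {f ln pl pr : Nat} {n rs re : Int}
    (he_room : 0x700000 + 4048 ≤ (u.reg .rsp).toNat) (he_top : (u.reg .rsp).toNat + 8 ≤ 0x800000)
    (hf : f + 1808 ≤ 0xC00000) (hln : ln + 4 ≤ 0x800000) (hpl : pl + 4 ≤ 0x800000) (hpr : pr + 4 ≤ 0x800000)
    (hrs : rs = R.i32 pr)
    (hW3 : W3 (stb_vorbis.blocksize_1 R f) n (R.i32 pl) rs (R.i32 ln) re) :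
    Top.W3Mem ((R.writeLE ((u.reg .rsp - 152) >>> 3 + 12582912) 8 0).writeLE
      ((u.reg .rsp - 152) >>> 3 + 12582920) 4 0) f ln pl pr := by
  have e_sh0 : ((u.reg .rsp - 152) >>> 3 + 12582912).toNat = 12582912 + ((u.reg .rsp).toNat - 152) / 8 := by u_omega
  have e_sh8 : ((u.reg .rsp - 152) >>> 3 + 12582920).toNat = 12582920 + ((u.reg .rsp).toNat - 152) / 8 := by u_omega
  have hs : Mem.SameExcept [⟨0xC00000, 0xE00000⟩] R ((R.writeLE ((u.reg .rsp - 152) >>> 3 + 12582912) 8 0).writeLE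
      ((u.reg .rsp - 152) >>> 3 + 12582920) 4 0) := by
    u_same
  have E : Mem.EqOn 0 0xC00000 R ((R.writeLE ((u.reg .rsp - 152) >>> 3 + 12582912) 8 0).writeLE
      ((u.reg .rsp - 152) >>> 3 + 12582920) 4 0) := by
    refine hs.eqOn _ _ ?_
    intro w hw
    simp only [List.mem_cons, List.not_mem_nil, or_false] at hw
    subst hw
    left
    exact Nat.le_refl _
  refine ⟨n, re, ?_⟩
  have k1 : stb_vorbis.blocksize_1 ((R.writeLE ((u.reg .rsp - 152) >>> 3 + 12582912) 8 0).writeLE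
      ((u.reg .rsp - 152) >>> 3 + 12582920) 4 0) f = stb_vorbis.blocksize_1 R f := by
    simp only [vacc, voff]
    exact E.i32 _ (Nat.zero_le _) (by omega) (by omega)
  rw [k1, E.i32 pl (Nat.zero_le _) (by omega) (by omega), E.i32 pr (Nat.zero_le _) (by omega) (by omega),
    E.i32 ln (Nat.zero_le _) (by omega) (by omega), ← hrs]
  exact hW3


set_option maxRecDepth 4000 in
set_option maxHeartbeats 16000000 in
/-- **The arm `eax = 1` from `cut1` to the `ret`** (0x1136d5 `jne` taken; 0x1136fd … 0x113749, then the epilogue 0x1136d9 … 0x1136fc; C 3480):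
the two checked loads of `*p_right` / `*p_left` (live objects of a caller's frame), the call of vorbis_decode_packet_rest (`rest_pre`),
after it the callee's footprint made coarse (`rest_windows_coarse`, `rest_same`), the saved registers read back through it, `add rsp,
0x10`, the epilogue (`epilogue_post`), W3 for the three objects (`w3_final`, `pright_kept`). -/
theorem seg2_one (Lay : Layout) (hLay : Lay.hi = 0x1000000) (μ : Microarch) (hμ : UserX.MicroOK μ) (u₀ : State)
    (hcode : HasCodeNat Lay u₀ Vorbis.L.vorbis_decode_packet.entry Vorbis.Code.code_vorbis_decode_packet.nat
      Vorbis.L.vorbis_decode_packet.size)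
    (h_load4 : Asan.SmallCheck Lay μ Vorbis.WayInv (Vorbis.CodeOK u₀) [.rax, .rcx, .rdx] 4 Vorbis.L.__asan_load4_noabort.entry)
    (h_rest : ∀ (others : List Obj) (frames : List (Nat × FrameLayout)) (len : Nat) (Ar : Arena) (stored room : Int)
      (mode : Nat) (ysz : Nat → Nat), Calls Lay μ Vorbis.WayInv (Vorbis.conv u₀) Vorbis.L.vorbis_decode_packet_rest.entry
        (Vorbis.Spec.vorbis_decode_packet_rest.spec others frames len Ar stored room mode ysz))
    (others : List Obj) (frames : List (Nat × FrameLayout)) (len : Nat) (A : Arena) (stored room : Int)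
    (ysz : Nat → Nat) (u : State) (ret : Word) (v : State)
    (hat : AtCut1 u₀ others frames len A stored room ysz u ret v) (hz : s32 (v.reg .rax) = 1) :
    ReachVia Lay μ Vorbis.WayInv v
      (Returned (conv u₀) (vorbis_decode_packet.spec others frames len A stored room ysz) u ret) := by
  have he := hat.entry
  v_entry he
  obtain ⟨hsh, hinv, hlen, hleft, hright, hapart⟩ := hat.pre
  have hmode := hat.mode hz
  have h_rest' := h_rest others (ownFrames frames u) len A stored room
    (v.mem.i32 (u.reg .rsp - 120).toNat).toNat ysz
  have w_rip := hat.rip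
  have c_rsp := hat.rsp
  have c_rbx := hat.rbx
  have c_r12 := hat.r12
  have c_r13 := hat.r13
  have c_r14 := hat.r14
  have c_r15 := hat.r15
  have c_rbp := hat.rbp
  have w_eq := Vorbis.conv_code_eqOn hat.code
  have hdf : v.flags .df = false := (show abiInv _ from hat.inv).1
  have hmx : v.mxcsr &&& 0x1F80 = 0x1F80 := (show abiInv _ from hat.inv).2
  have hsse := Vorbis.sseOK_of_abiInv hat.inv
  have s7 := hat.slot_len
  have hab_left : (u.reg .rsp).toNat + 8 ≤ (u.reg .rdx).toNat := by
    have h1 := hleft.1.above hsh.inv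
    have h2 := hleft.2
    omega
  have hab_right : (u.reg .rsp).toNat + 8 ≤ (u.reg .rcx).toNat := by
    have h1 := hright.1.above hsh.inv
    have h2 := hright.2
    omega
  have hab_len : (u.reg .rsp).toNat + 8 ≤ (u.reg .rsi).toNat := by
    have h1 := hlen.1.above hsh.inv
    have h2 := hlen.2
    omega
  have hhi_len := hlen.2.2
  have hhi_left := hleft.2.2
  have hhi_right := hright.2.2
  have hshadow := hat.shadow
  have s0 := hat.slot_ret
  have s1 := hat.slot_r15
  have s2 := hat.slot_r14
  have s3 := hat.slot_r13
  have s4 := hat.slot_r12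
  have s5 := hat.slot_rbp
  have s6 := hat.slot_rbx
  have e_sh0 : ((u.reg .rsp - 152) >>> 3 + 12582912).toNat = 12582912 + ((u.reg .rsp).toNat - 152) / 8 := by u_omega
  have e_sh8 : ((u.reg .rsp - 152) >>> 3 + 12582920).toNat = 12582920 + ((u.reg .rsp).toNat - 152) / 8 := by u_omega
  obtain ⟨z, c_rax⟩ : ∃ z, v.reg .rax = z := ⟨_, rfl⟩
  rw [c_rax] at hz
  have hnz : ¬ (Word.part Width.w32 z).toNat = 0 := by
    have h1 := s32_eq_argInt z
    rw [argInt_def] at h1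
    rw [part32_toNat]
    have h2 := sint32_cases (z.toNat % 2 ^ 32)
    have h3 : z.toNat % 2 ^ 32 < 2 ^ 32 := Nat.mod_lt _ (by decide)
    omega
  u_walk hcode [hμ.vendor] until [Vorbis.L.vorbis_decode_packet.cut2] span [Vorbis.L.textLo, Vorbis.L.textHi] side (v_side)
  · -- 0x113705: the check of `*p_right` — a live object of a caller's frame; only the return address was pushed since `cut1`
    have hun : ShadowUntouched v.mem s_113705.mem := by v_untouched
    exact (hright.1.mono (frames_sub _ _ _)).accSmall hshadow hun _ 4 (by decide) (Nat.le_refl _) (Nat.le_refl _)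
  · -- 0x113716: the check of `*p_left`
    have hun : ShadowUntouched v.mem s_113716.mem := by v_untouched
    exact (hleft.1.mono (frames_sub _ _ _)).accSmall hshadow hun _ 4 (by decide) (Nat.le_refl _) (Nat.le_refl _)
  · v_inv
  · exact rest_pre _ hsh hlen hleft hright hapart he_room he_top he_align hshadow hat.dec hmode w_rsp w_rdi w_rsi w_rdx
      w_rcx w_r9 w_mem
  · obtain ⟨hrax, hinv_r2, hdec_r2, hW3, _, _, _⟩ := w_post
    have hpre2 := rest_pre _ hsh hlen hleft hright hapart he_room he_top he_align hshadow hat.dec hmode w_rsp_113740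
      w_rdi_113740 w_rsi_113740 w_rdx_113740 w_rcx_113740 w_r9_113740 w_mem_113740
    have hdec_s2 := hpre2.2.1
    have hpl := pleft_eq _ _ he_room he_top w_rsp_113740 w_mem_113740
    have w_eq := Vorbis.conv_code_eqOn w_code
    have w_df := (show X86.User.abiInv _ from w_inv).1
    have w_mx := (show X86.User.abiInv _ from w_inv).2
    have w_sse := Vorbis.sseOK_of_abiInv w_inv
    have e192 : (u.reg .rsp - 192).toNat = (u.reg .rsp).toNat - 192 := by u_omega
    have hco := w_same.mono (rest_windows_coarse hdec_s2 (by rw [w_rsp_113740, e192]; omega))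
    simp only [vorbis_decode_packet_rest.lenOf, w_rsp_113740, w_rsi_113740, hpl, e192] at hco
    have hboth2 := rest_same (rcx := (u.reg .rcx).toNat) hinv.arena.AR1.2.2.2 hinv.arena.AR1x.2 he_room he_top hab_len
      hhi_len hab_left hhi_left hco
    obtain ⟨hap1, hap2, hap3⟩ := apart3 hapart
    have hpr := pright_kept hinv.arena.AR1x.2 he_room hab_right hhi_right hap2 hap3 hco
    have hvs : Mem.SameExcept [⟨(u.reg .rsp).toNat - 4048, (u.reg .rsp).toNat⟩] v.mem s_113740.mem := by
      u_same
    have hown2 := hboth2.2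
    have hstk2 := hboth2.1
    clear hco hboth2 hap1 hap2 hap3
    -- the stack slots the epilogue pops, over the three pushes and through the callee's footprint
    have hp0 : UInt64.ofNat (s_113740.mem.readLE (u.reg .rsp) 8) = ret := by u_resolve
    have hp1 : UInt64.ofNat (s_113740.mem.readLE (u.reg .rsp - 8) 8) = u.reg .r15 := by u_resolve
    have hp2 : UInt64.ofNat (s_113740.mem.readLE (u.reg .rsp - 16) 8) = u.reg .r14 := by u_resolve
    have hp3 : UInt64.ofNat (s_113740.mem.readLE (u.reg .rsp - 24) 8) = u.reg .r13 := by u_resolve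
    have hp4 : UInt64.ofNat (s_113740.mem.readLE (u.reg .rsp - 32) 8) = u.reg .r12 := by u_resolve
    have hp5 : UInt64.ofNat (s_113740.mem.readLE (u.reg .rsp - 40) 8) = u.reg .rbp := by u_resolve
    have hp6 : UInt64.ofNat (s_113740.mem.readLE (u.reg .rsp - 48) 8) = u.reg .rbx := by u_resolve
    have t0 : UInt64.ofNat (s_113740r.mem.readLE (u.reg .rsp) 8) = ret := by u_frame hp0
    have t1 : UInt64.ofNat (s_113740r.mem.readLE (u.reg .rsp - 8) 8) = u.reg .r15 := by u_frame hp1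
    have t2 : UInt64.ofNat (s_113740r.mem.readLE (u.reg .rsp - 16) 8) = u.reg .r14 := by u_frame hp2
    have t3 : UInt64.ofNat (s_113740r.mem.readLE (u.reg .rsp - 24) 8) = u.reg .r13 := by u_frame hp3
    have t4 : UInt64.ofNat (s_113740r.mem.readLE (u.reg .rsp - 32) 8) = u.reg .r12 := by u_frame hp4
    have t5 : UInt64.ofNat (s_113740r.mem.readLE (u.reg .rsp - 40) 8) = u.reg .rbp := by u_frame hp5
    have t6 : UInt64.ofNat (s_113740r.mem.readLE (u.reg .rsp - 48) 8) = u.reg .rbx := by u_frame hp6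
    clear hstk2 hp0 hp1 hp2 hp3 hp4 hp5 hp6 s0 s1 s2 s3 s4 s5 s6
    -- `right_start` (r9d at the call) is `*p_right`, which the callee does not write
    have hrs : vorbis_decode_packet_rest.rsOf s_113740 = s_113740r.mem.i32 (u.reg .rcx).toNat := by
      show s32 (s_113740.reg .r9) = _
      rw [w_r9_113740, s32_load, hpr]
      have hE : Mem.EqOn (u.reg .rcx).toNat ((u.reg .rcx).toNat + 4) v.mem s_113740.mem := by
        refine hvs.eqOn _ _ ?_
        intro w hw
        simp only [List.mem_cons, List.not_mem_nil, or_false] at hw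
        subst hw
        simp only []
        omega
      exact (hE.i32 _ (Nat.le_refl _) (Nat.le_refl _) (by omega)).symm
    have hfhi : (u.reg .rdi).toNat + 1808 ≤ 0xC00000 := by
      have h1 := hinv.arena.block_range (p := (u.reg .rdi).toNat) (n := Off.sizeof.stb_vorbis) hinv.obj
      have h2 := le_r8 Off.sizeof.stb_vorbis
      have h3 := hinv.arena.AR1
      have h4 := hinv.arena.AR2
      simp only [voff] at h1 h2
      omega
    simp only [vorbis_decode_packet_rest.fOf, vorbis_decode_packet_rest.lenOf, w_rdi_113740, w_rsi_113740, hpl]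
      at hW3 hdec_r2
    have hw3f := w3_final he_room he_top hfhi hhi_len hhi_left hhi_right hrs hW3
    have hpost := epilogue_post hsh he_align he_room he_top hinv_r2 hdec_r2
    have hsame_r2 := (hat.same.trans (hvs.mono (by
      intro w hw a h1 h2
      simp only [List.mem_cons, List.not_mem_nil, or_false] at hw
      subst hw
      exact ⟨_, List.mem_cons_self, h1, h2⟩))).trans hown2
    clear hW3 hdec_r2 hinv_r2 hvs hown2 hpr hrs hpre2 hdec_s2
    have c_rbx2 : s_113740r.reg .rbx = (u.reg .rsp - 152) >>> 3 := by
      rw [w_kept.get .rbx rfl]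
      exact c_rbx
    obtain ⟨z2, c_rax2⟩ : ∃ z2, s_113740r.reg .rax = z2 := ⟨_, rfl⟩
    u_walk hcode [hμ.vendor] span [Vorbis.L.textLo, Vorbis.L.textHi] side (v_side)
    refine ReachVia.done ?_
    refine X86.User.Returned.mk w_rip w_rsp ?_ ?_ (Vorbis.conv_code_in w_eq) ?_ ?_
    · -- the callee-saved registers: six popped back
      intro r hr
      cases r <;> first
        | (exact absurd hr (by decide))
        | (with_reducible assumption)
    · -- the footprint: the two shadow stores on top of everything so far
      simp only [X86.User.Spec.footprint, vspec]
      rw [w_mem]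
      refine Mem.SameExcept.step_writeLE _ _ _ (Mem.SameExcept.step_writeLE _ _ _ hsame_r2 ?_ ?_) ?_ ?_
      · omega
      · exact ⟨⟨0xC00000, 0xE00000⟩, List.mem_cons_of_mem _ (List.mem_cons_of_mem _ List.mem_cons_self),
          by simp only []; omega, by simp only []; omega⟩
      · omega
      · exact ⟨⟨0xC00000, 0xE00000⟩, List.mem_cons_of_mem _ (List.mem_cons_of_mem _ List.mem_cons_self),
          by simp only []; omega, by simp only []; omega⟩
    · v_inv
    · -- the postcondition
      have e : (u.reg .rsp + 8).toNat = (u.reg .rsp).toNat + 8 := by u_omega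
      refine ⟨?_, ?_, ?_⟩
      · rw [w_rsp, w_mem, e]
        exact hpost.1
      · rw [w_mem]
        exact hpost.2
      · intro _
        rw [w_mem]
        exact hw3f


end Vorbis.Spec.vorbis_decode_packet
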